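-- pv_equiv track=rewrite | github.com/PolinaNik/MULTI_ARINC | modules.py | combine_coord
-- ===== SOURCE A (Python) =====
-- def combine_coord(list1, list2):
--     for i in range(len(list1)):
--         line1 = list1[i]
--         name1 = line1[0]
--         coord1 = line1[1]
--         for q in range(len(list2)):
--             line2 = list2[q]
--             route = line2[0]
--             points = line2[1:]
--             for w in range(len(points)):
--                 point = points[w]
--                 if name1 == point:
--                     yield route, name1, coord1
-- ===== SOURCE B (Python) =====
-- def combine_coord(list1, list2):
--     # Build once: point value -> routes containing it, in scan order (with multiplicity),
--     # then answer each list1 row by one lookup instead of rescanning list2.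
--     index = {}
--     for line2 in list2:
--         if line2:
--             route = line2[0]
--             for point in line2[1:]:
--                 index.setdefault(point, []).append(route)
--     for line1 in list1:
--         name1 = line1[0]
--         coord1 = line1[1]
--         for route in index.get(name1, []):
--             yield route, name1, coord1
-- ===== Notes on version B (the rewrite author's own statement) =====
-- stated objective: alternative
-- what changed: Instead of rescanning every route's point list for every name in list1 (triple nested loop), B builds a hash index point -> ordered route list in one pass over list2 and then answers each list1 row by a single dictionary lookup.
import Mathlib
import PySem

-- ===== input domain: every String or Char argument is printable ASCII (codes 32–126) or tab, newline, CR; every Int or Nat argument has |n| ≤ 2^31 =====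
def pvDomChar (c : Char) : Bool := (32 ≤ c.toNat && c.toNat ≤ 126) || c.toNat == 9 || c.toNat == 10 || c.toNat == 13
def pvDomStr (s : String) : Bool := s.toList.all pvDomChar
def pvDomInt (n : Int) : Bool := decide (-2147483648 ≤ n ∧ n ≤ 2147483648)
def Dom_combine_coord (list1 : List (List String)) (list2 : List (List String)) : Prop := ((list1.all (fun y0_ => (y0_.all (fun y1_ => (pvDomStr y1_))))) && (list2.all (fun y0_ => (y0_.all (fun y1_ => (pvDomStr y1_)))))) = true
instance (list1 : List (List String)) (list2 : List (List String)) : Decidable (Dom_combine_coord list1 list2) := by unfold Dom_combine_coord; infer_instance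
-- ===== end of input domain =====

-- B replaces A's triple nested rescan by a one-pass hash index (point -> ordered route list) plus per-row lookups.


-- ===== PORT A =====
def combine_coord (list1 : List (List String)) (list2 : List (List String)) : List (String × String × String) :=
  (PySem.List.pyRange 0 (PySem.List.len list1) 1).foldl (fun acc i =>
    let line1 := PySem.List.pyGetD list1 i []
    let name1 := PySem.List.pyGetD line1 0 ""
    let coord1 := PySem.List.pyGetD line1 1 ""
    (PySem.List.pyRange 0 (PySem.List.len list2) 1).foldl (fun acc q =>
      let line2 := PySem.List.pyGetD list2 q []
      let route := PySem.List.pyGetD line2 0 ""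
      let points := PySem.List.slice line2 (some 1) none
      (PySem.List.pyRange 0 (PySem.List.len points) 1).foldl (fun acc w =>
        let point := PySem.List.pyGetD points w ""
        if name1 == point then acc ++ [(route, name1, coord1)] else acc) acc) acc) []

-- ===== PORT B =====
def combine_coord_alt (list1 : List (List String)) (list2 : List (List String)) : List (String × String × String) :=
  let index := list2.foldl (fun d line2 =>
      if line2.isEmpty then d else
      let route := PySem.List.pyGetD line2 0 ""
      (PySem.List.slice line2 (some 1) none).foldl (fun d point =>
        d.modify point [] (fun rs => rs ++ [route])) d)
    PySem.Dict.empty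
  list1.foldl (fun acc line1 =>
    let name1 := PySem.List.pyGetD line1 0 ""
    let coord1 := PySem.List.pyGetD line1 1 ""
    (index.getD name1 []).foldl (fun acc route => acc ++ [(route, name1, coord1)]) acc) []

-- ===== PRECONDITION & SPEC =====
-- Pre_ excludes exactly the inputs on which Python A raises IndexError: a row of list1 with
-- fewer than 2 entries, or (when list1 is nonempty, so list2 is actually scanned) an empty
-- row of list2; when list1 is empty A returns [] whatever list2 holds, and that is inside Pre_.
def Pre_combine_coord (list1 : List (List String)) (list2 : List (List String)) : Prop :=
  (∀ l ∈ list1, 2 ≤ l.length) ∧ (list1 = [] ∨ ∀ l ∈ list2, l ≠ [])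
instance (list1 : List (List String)) (list2 : List (List String)) : Decidable (Pre_combine_coord list1 list2) := by unfold Pre_combine_coord; infer_instance
def pvWitness_combine_coord : List (List String) × List (List String) :=
  ([["A", "1.0,2.0"], ["B", "3.0,4.0"]], [["R1", "A", "C"], ["R2", "B", "A"]])
def Spec_combine_coord (list1 : List (List String)) (list2 : List (List String)) (out : List (String × String × String)) : Prop := out = combine_coord_alt list1 list2
instance (list1 : List (List String)) (list2 : List (List String)) (out : List (String × String × String)) : Decidable (Spec_combine_coord list1 list2 out) := by unfold Spec_combine_coord; infer_instance

-- ===== CLAIM (what is proved, stated in full; the proofs are below) =====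
def Claim_equal_combine_coord : Prop := ∀ (list1 : List (List String)) (list2 : List (List String)), Dom_combine_coord list1 list2 → Pre_combine_coord list1 list2 → Spec_combine_coord list1 list2 (combine_coord list1 list2)

-- ===== LEMMAS AND PROOFS =====

/-- The (point, route) occurrences of `list2`, in A's scan order. -/
def pvPairs (list2 : List (List String)) : List (String × String) :=
  list2.flatMap (fun l => l.tail.map (fun pt => (pt, PySem.List.pyGetD l 0 "")))

theorem pvMid (name1 coord1 : String) (list2 : List (List String))
    (acc : List (String × String × String)) :
    list2.foldl (fun acc line2 =>
      let route := PySem.List.pyGetD line2 0 ""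
      let points := PySem.List.slice line2 (some 1) none
      (PySem.List.pyRange 0 (PySem.List.len points) 1).foldl (fun acc w =>
        let point := PySem.List.pyGetD points w ""
        if name1 == point then acc ++ [(route, name1, coord1)] else acc) acc) acc
    = acc ++ ((pvPairs list2).filter (fun p => p.1 == name1)).map
        (fun p => (p.2, name1, coord1)) := by
  induction list2 generalizing acc with
  | nil => simp [pvPairs]
  | cons l t ih =>
    simp only [List.foldl_cons, ih, pvPairs, List.flatMap_cons, List.filter_append,
      List.map_append, ← List.append_assoc]
    rw [PySem.List.foldl_pyRange_zero_pyGetD (PySem.List.slice l (some 1) none) ""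
        (fun acc point => if name1 == point then
          acc ++ [(PySem.List.pyGetD l 0 "", name1, coord1)] else acc) acc,
      PySem.List.foldl_append_if, PySem.List.slice_from_one]
    simp only [List.filter_map, Function.comp_def, List.map_map]
    rw [List.filter_congr (l := l.tail) (fun pt _ => Bool.beq_comm (a := name1) (b := pt))]

theorem pvIndex (list2 : List (List String)) (name1 : String)
    (d : PySem.Dict String (List String)) :
    (list2.foldl (fun d line2 =>
        if line2.isEmpty then d else
        let route := PySem.List.pyGetD line2 0 ""
        (PySem.List.slice line2 (some 1) none).foldl (fun d point =>
          d.modify point [] (fun rs => rs ++ [route])) d) d).getD name1 []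
    = d.getD name1 [] ++ ((pvPairs list2).filter (fun p => p.1 == name1)).map (·.2) := by
  induction list2 generalizing d with
  | nil => simp [pvPairs]
  | cons l t ih =>
    by_cases hl : l = []
    · subst hl
      simp [pvPairs] at ih ⊢
      exact ih d
    · simp only [List.foldl_cons, List.isEmpty_eq_false_iff.mpr hl, Bool.false_eq_true,
        if_false, ih, pvPairs, List.flatMap_cons, List.filter_append, List.map_append,
        ← List.append_assoc]
      congr 1
      rw [PySem.List.slice_from_one,
        show (l.tail.foldl (fun d pt =>
            d.modify pt [] (fun rs => rs ++ [PySem.List.pyGetD l 0 ""])) d)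
          = ((l.tail.map (fun pt => (pt, PySem.List.pyGetD l 0 ""))).foldl
              (fun d p => d.modify p.1 [] (fun rs => rs ++ [p.2])) d) from
          (List.foldl_map (f := fun pt => (pt, PySem.List.pyGetD l 0 ""))
            (g := fun d p => d.modify p.1 [] fun rs => rs ++ [p.2])
            (l := l.tail) (init := d)).symm,
        PySem.Dict.getD_foldl_modify_append]

theorem pvA_eq (list1 list2 : List (List String)) :
    combine_coord list1 list2
    = list1.foldl (fun acc line1 =>
        acc ++ ((pvPairs list2).filter (fun p => p.1 == PySem.List.pyGetD line1 0 "")).map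
          (fun p => (p.2, PySem.List.pyGetD line1 0 "", PySem.List.pyGetD line1 1 ""))) [] := by
  unfold combine_coord
  rw [PySem.List.foldl_pyRange_zero_pyGetD list1 []
      (fun acc line1 =>
        let name1 := PySem.List.pyGetD line1 0 ""
        let coord1 := PySem.List.pyGetD line1 1 ""
        (PySem.List.pyRange 0 (PySem.List.len list2) 1).foldl (fun acc q =>
          let line2 := PySem.List.pyGetD list2 q []
          let route := PySem.List.pyGetD line2 0 ""
          let points := PySem.List.slice line2 (some 1) none
          (PySem.List.pyRange 0 (PySem.List.len points) 1).foldl (fun acc w =>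
            let point := PySem.List.pyGetD points w ""
            if name1 == point then acc ++ [(route, name1, coord1)] else acc) acc) acc) []]
  have hF : (fun (acc : List (String × String × String)) (line1 : List String) =>
        let name1 := PySem.List.pyGetD line1 0 ""
        let coord1 := PySem.List.pyGetD line1 1 ""
        (PySem.List.pyRange 0 (PySem.List.len list2) 1).foldl (fun acc q =>
          let line2 := PySem.List.pyGetD list2 q []
          let route := PySem.List.pyGetD line2 0 ""
          let points := PySem.List.slice line2 (some 1) none
          (PySem.List.pyRange 0 (PySem.List.len points) 1).foldl (fun acc w =>
            let point := PySem.List.pyGetD points w ""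
            if name1 == point then acc ++ [(route, name1, coord1)] else acc) acc) acc)
      = (fun acc line1 =>
        acc ++ ((pvPairs list2).filter (fun p => p.1 == PySem.List.pyGetD line1 0 "")).map
          (fun p => (p.2, PySem.List.pyGetD line1 0 "", PySem.List.pyGetD line1 1 ""))) := by
    funext acc line1
    show (PySem.List.pyRange 0 (PySem.List.len list2) 1).foldl (fun acc q =>
        let line2 := PySem.List.pyGetD list2 q []
        let route := PySem.List.pyGetD line2 0 ""
        let points := PySem.List.slice line2 (some 1) none
        (PySem.List.pyRange 0 (PySem.List.len points) 1).foldl (fun acc w =>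
          let point := PySem.List.pyGetD points w ""
          if PySem.List.pyGetD line1 0 "" == point then
            acc ++ [(route, PySem.List.pyGetD line1 0 "", PySem.List.pyGetD line1 1 "")]
          else acc) acc) acc = _
    rw [PySem.List.foldl_pyRange_zero_pyGetD list2 []
        (fun acc line2 =>
          let route := PySem.List.pyGetD line2 0 ""
          let points := PySem.List.slice line2 (some 1) none
          (PySem.List.pyRange 0 (PySem.List.len points) 1).foldl (fun acc w =>
            let point := PySem.List.pyGetD points w ""
            if PySem.List.pyGetD line1 0 "" == point then
              acc ++ [(route, PySem.List.pyGetD line1 0 "", PySem.List.pyGetD line1 1 "")]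
            else acc) acc) acc]
    exact pvMid (PySem.List.pyGetD line1 0 "") (PySem.List.pyGetD line1 1 "") list2 acc
  rw [hF]

theorem pvB_eq (list1 list2 : List (List String)) :
    combine_coord_alt list1 list2
    = list1.foldl (fun acc line1 =>
        acc ++ ((pvPairs list2).filter (fun p => p.1 == PySem.List.pyGetD line1 0 "")).map
          (fun p => (p.2, PySem.List.pyGetD line1 0 "", PySem.List.pyGetD line1 1 ""))) [] := by
  unfold combine_coord_alt
  simp only [pvIndex, PySem.Dict.getD_empty, List.nil_append,
    PySem.List.foldl_append_singleton_eq_map, List.map_map, Function.comp_def]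

-- ===== VERDICT (by name: the statement is the Claim_ definition above) =====
theorem combine_coord_spec : Claim_equal_combine_coord := by
  intro list1 list2 _ _
  unfold Spec_combine_coord
  rw [pvA_eq, pvB_eq]
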